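-- pv_equiv track=rewrite | github.com/minhphan2/BlueOCentrancetest | Task1/task1.py | dodaixuathiennhieunhat
-- ===== SOURCE A (Python) =====
-- def dodaixuathiennhieunhat(str):
--     dem_do_dai = {}
--
--     for i in str:
--         dodai =len(i)
--
--         if dodai not in dem_do_dai:
--             dem_do_dai[dodai] = 1
--         else:
--             dem_do_dai[dodai] += 1
--
--     xh_nhieu_nhat = 0
--     do_dai_nhieu_nhat = 0
--
--     for dodai, soluong in dem_do_dai.items():
--         if soluong > xh_nhieu_nhat:
--             xh_nhieu_nhat = soluong
--             do_dai_nhieu_nhat = dodai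
--
--
--     result = []
--
--     for i in str:
--         if len(i) == do_dai_nhieu_nhat:
--             result.append(i)
--
--     return result
-- ===== SOURCE B (Python) =====
-- def dodaixuathiennhieunhat(str):
--     groups = {}
--     for s in str:
--         groups.setdefault(len(s), []).append(s)
--     best_count = 0
--     best_group = []
--     for group in groups.values():
--         if len(group) > best_count:
--             best_count = len(group)
--             best_group = group
--     return best_group
-- ===== Notes on version B (the rewrite author's own statement) =====
-- stated objective: alternative
-- what changed: B groups the strings by length into one dict (length -> list of strings) in a single pass and returns the winning group directly via a strict-'>' scan over the dict's values, instead of A's count dict, count scan, and a third full re-scan of the input to rebuild the result.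
import Mathlib
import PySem

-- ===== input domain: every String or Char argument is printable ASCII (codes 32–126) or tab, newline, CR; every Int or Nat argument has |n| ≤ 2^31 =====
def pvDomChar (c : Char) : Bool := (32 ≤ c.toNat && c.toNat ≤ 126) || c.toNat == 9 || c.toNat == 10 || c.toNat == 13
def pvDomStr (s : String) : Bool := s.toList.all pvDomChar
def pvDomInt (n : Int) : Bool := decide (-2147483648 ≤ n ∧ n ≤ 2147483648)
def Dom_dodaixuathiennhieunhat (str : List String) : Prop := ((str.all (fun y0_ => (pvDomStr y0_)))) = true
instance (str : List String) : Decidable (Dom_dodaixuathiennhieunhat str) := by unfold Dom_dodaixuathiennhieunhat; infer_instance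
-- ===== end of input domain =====

-- B groups the strings by length in one dict pass and returns the best group directly (same strict-'>' insertion-order
-- tie-breaking), instead of counting lengths, scanning the counts, and then re-scanning the whole input a third time.

-- ===== PORT A =====
def dodaixuathiennhieunhat (str : List String) : List String :=
  -- first loop: dem_do_dai[len(i)] = 1 if absent else dem_do_dai[len(i)] + 1
  let dem : PySem.Dict Int Int :=
    str.foldl (fun d i =>
      let dodai := PySem.Str.len i
      if d.contains dodai = false then d.insert dodai 1
      else d.insert dodai (d.getD dodai 0 + 1)) PySem.Dict.empty
  -- second loop over dem.items(): strict '>' keeps the first maximal length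
  let sel : Int × Int :=
    dem.items.foldl (fun st p => if p.2 > st.1 then (p.2, p.1) else st) (0, 0)
  -- third loop: collect strings of the winning length
  str.foldl (fun r i => if PySem.Str.len i == sel.2 then r ++ [i] else r) []

-- ===== PORT B =====
def dodaixuathiennhieunhat_alt (str : List String) : List String :=
  -- groups.setdefault(len(s), []).append(s)  ==  groups[len(s)] = groups.get(len(s), []) + [s]
  let groups : PySem.Dict Int (List String) :=
    str.foldl (fun d s => d.modify (PySem.Str.len s) [] (fun g => g ++ [s])) PySem.Dict.empty
  let sel : Int × List String :=
    groups.values.foldl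
      (fun st g => if (g.length : Int) > st.1 then ((g.length : Int), g) else st)
      (0, ([] : List String))
  sel.2

-- ===== PRECONDITION & SPEC =====
def Spec_dodaixuathiennhieunhat (str : List String) (out : List String) : Prop := out = dodaixuathiennhieunhat_alt str
instance (str : List String) (out : List String) : Decidable (Spec_dodaixuathiennhieunhat str out) := by unfold Spec_dodaixuathiennhieunhat; infer_instance

-- ===== CLAIM (what is proved, stated in full; the proofs are below) =====
def Claim_equal_dodaixuathiennhieunhat : Prop := ∀ (str : List String), Dom_dodaixuathiennhieunhat str → Spec_dodaixuathiennhieunhat str (dodaixuathiennhieunhat str)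

-- ===== LEMMAS AND PROOFS =====

-- A's first loop is Counter(map(len, str)).
lemma demEqCounter (str : List String) :
    str.foldl (fun d i =>
      let dodai := PySem.Str.len i
      if d.contains dodai = false then d.insert dodai 1
      else d.insert dodai (d.getD dodai 0 + 1)) PySem.Dict.empty
      = PySem.Dict.counter (str.map PySem.Str.len) := by
  have hstep : (fun (d : PySem.Dict Int Int) (i : String) =>
      let dodai := PySem.Str.len i
      if d.contains dodai = false then d.insert dodai 1
      else d.insert dodai (d.getD dodai 0 + 1))
      = (fun d i => d.insert (PySem.Str.len i) (d.getD (PySem.Str.len i) 0 + 1)) := by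
    funext d i
    show (if d.contains (PySem.Str.len i) = false then d.insert (PySem.Str.len i) 1
      else d.insert (PySem.Str.len i) (d.getD (PySem.Str.len i) 0 + 1)) = _
    by_cases h : d.contains (PySem.Str.len i) = false
    · rw [if_pos h, PySem.Dict.getD_of_not_contains d 0 h]; norm_num
    · rw [if_neg h]
  rw [hstep, ← PySem.Dict.foldl_insert_getD_add_one_eq_counter (str.map PySem.Str.len),
    List.foldl_map]

-- The getD of B's grouping dict is the filter of the input by that length.
lemma groupsGetD (str : List String) (k : Int) :
    (str.foldl (fun d s => d.modify (PySem.Str.len s) [] (fun g => g ++ [s]))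
        (PySem.Dict.empty : PySem.Dict Int (List String))).getD k []
      = str.filter (fun s => PySem.Str.len s == k) := by
  have h := PySem.Dict.getD_foldl_modify_append
      (str.map (fun s => (PySem.Str.len s, s))) (PySem.Dict.empty : PySem.Dict Int (List String)) k
  rw [List.foldl_map] at h
  simpa [List.filter_map, List.map_map, Function.comp_def] using h

-- B's dict's value list: one filtered group per distinct length, in first-occurrence order.
lemma groupsValues (str : List String) :
    (str.foldl (fun d s => d.modify (PySem.Str.len s) [] (fun g => g ++ [s]))
        (PySem.Dict.empty : PySem.Dict Int (List String))).values
      = (PySem.Set.ofList (str.map PySem.Str.len)).map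
          (fun k => str.filter (fun s => PySem.Str.len s == k)) := by
  have hnd := PySem.Dict.nodup_keys_foldl_modify_key str PySem.Str.len ([] : List String)
      (fun _ s g => g ++ [s]) PySem.Dict.empty (by simp)
  rw [PySem.Dict.values_eq_map_keys _ hnd []]
  rw [PySem.Dict.keys_foldl_modify_key str PySem.Str.len ([] : List String)
      (fun _ s g => g ++ [s]) PySem.Dict.empty]
  have : (PySem.Dict.empty : PySem.Dict Int (List String)).keys = [] := by simp
  rw [this, PySem.Set.update_nil_left]
  exact List.map_congr_left (fun k _ => groupsGetD str k)

-- The shared selection loop: folding strict '>' over the counts and over the groups, in the same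
-- key order, picks the same winner; the B-state carries grp of the A-state's winning key.
lemma selLoop (cnt : Int → Int) (grp : Int → List String) :
    ∀ (L : List Int), (∀ k ∈ L, cnt k = ((grp k).length : Int) ∧ 0 < cnt k) →
    ∀ (xh dd : Int) (bg : List String),
      ((xh = 0 ∧ bg = []) ∨ (bg = grp dd ∧ 0 < xh)) →
      (L.foldl (fun st k => if ((grp k).length : Int) > st.1 then (((grp k).length : Int), grp k) else st) (xh, bg)).2
        = grp ((L.foldl (fun st k => if cnt k > st.1 then (cnt k, k) else st) (xh, dd)).2)
      ∨ (L = [] ∧ xh = 0 ∧ bg = []) := by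
  intro L
  induction L with
  | nil =>
    intro _ xh dd bg hinv
    rcases hinv with ⟨h1, h2⟩ | ⟨h1, _⟩
    · exact Or.inr ⟨rfl, h1, h2⟩
    · exact Or.inl h1
  | cons k L ih =>
    intro hmem xh dd bg hinv
    obtain ⟨hck, hcpos⟩ := hmem k (by simp)
    have hmem' : ∀ j ∈ L, cnt j = ((grp j).length : Int) ∧ 0 < cnt j :=
      fun j hj => hmem j (by simp [hj])
    simp only [List.foldl_cons]
    rcases hinv with ⟨hx, hb⟩ | ⟨hb, hx⟩
    · subst hx; subst hb
      rw [if_pos (by omega : cnt k > (0 : Int)),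
        if_pos (by rw [← hck]; omega : ((grp k).length : Int) > (0 : Int)), ← hck]
      rcases ih hmem' (cnt k) k (grp k) (Or.inr ⟨rfl, hcpos⟩) with h | ⟨_, h0, _⟩
      · exact Or.inl h
      · omega
    · subst hb
      by_cases hgt : cnt k > xh
      · rw [if_pos hgt, if_pos (by rw [← hck]; exact hgt), ← hck]
        rcases ih hmem' (cnt k) k (grp k) (Or.inr ⟨rfl, hcpos⟩) with h | ⟨_, h0, _⟩
        · exact Or.inl h
        · omega
      · rw [if_neg hgt, if_neg (by rw [← hck]; exact hgt)]
        rcases ih hmem' xh dd (grp dd) (Or.inr ⟨rfl, hx⟩) with h | ⟨_, h0, _⟩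
        · exact Or.inl h
        · omega

-- counts of a length = size of its group
lemma cntEqLen (str : List String) (k : Int) :
    (((str.map PySem.Str.len).count k : Nat) : Int)
      = ((str.filter (fun s => PySem.Str.len s == k)).length : Int) := by
  rw [List.count_eq_countP, List.countP_map, List.countP_eq_length_filter]
  rfl

lemma mainEq (str : List String) :
    dodaixuathiennhieunhat str = dodaixuathiennhieunhat_alt str := by
  cases str with
  | nil => rfl
  | cons s rest =>
    simp only [dodaixuathiennhieunhat, dodaixuathiennhieunhat_alt]
    rw [demEqCounter, groupsValues, PySem.Dict.items_counter, List.foldl_map, List.foldl_map]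
    set str := s :: rest with hstr
    set L := PySem.Set.ofList (str.map PySem.Str.len) with hL
    have hcnt : ∀ k ∈ L, (((str.map PySem.Str.len).count k : Nat) : Int)
        = (((str.filter (fun s => PySem.Str.len s == k)).length : Nat) : Int)
        ∧ 0 < (((str.map PySem.Str.len).count k : Nat) : Int) := by
      intro k hk
      refine ⟨cntEqLen str k, ?_⟩
      have : k ∈ str.map PySem.Str.len := (PySem.Set.mem_ofList _ _).mp hk
      have := List.count_pos_iff.mpr this
      omega
    have hsel := selLoop (fun k => (((str.map PySem.Str.len).count k : Nat) : Int))
        (fun k => str.filter (fun s => PySem.Str.len s == k)) L hcnt 0 0 [] (Or.inl ⟨rfl, rfl⟩)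
    rcases hsel with h | ⟨hnil, _, _⟩
    · rw [h]
      rw [PySem.List.foldl_append_if_eq_filter
        (fun i => PySem.Str.len i == (L.foldl (fun st k =>
          if (((str.map PySem.Str.len).count k : Nat) : Int) > st.1
          then ((((str.map PySem.Str.len).count k : Nat) : Int), k) else st) (0, 0)).2) str []]
      rfl
    · exfalso
      have : PySem.Str.len s ∈ L := by
        rw [hL, PySem.Set.mem_ofList]
        simp [hstr]
      rw [hnil] at this
      simp at this

-- ===== VERDICT (by name: the statement is the Claim_ definition above) =====
theorem dodaixuathiennhieunhat_spec : Claim_equal_dodaixuathiennhieunhat := by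
  intro str _
  show dodaixuathiennhieunhat str = dodaixuathiennhieunhat_alt str
  exact mainEq str
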